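-- pv_equiv track=rewrite | github.com/avielmoshe/Introduction-to-Computer-Science | python/week7.py | make_new_number
-- ===== SOURCE A (Python) =====
-- def make_new_number(num_1,num_2):
--     new_number = 0
--     multi = 1
--     while num_1>0 and num_2>0:
--        digit_1 = num_1 % 10
--        digit_2 = num_2 % 10
--        smaller_digit = digit_2 if digit_1 > digit_2 else digit_1
--        new_number += smaller_digit * multi
--        multi *= 10
--        num_1, num_2 = num_1 // 10, num_2 // 10
--
--     if not num_1 and not num_2:
--         return new_number
--     else:
--         return  -1
-- ===== SOURCE B (Python) =====
-- def make_new_number(num_1, num_2):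
--     if num_1 <= 0 or num_2 <= 0:
--         return 0 if num_1 == 0 and num_2 == 0 else -1
--     rest = make_new_number(num_1 // 10, num_2 // 10)
--     return -1 if rest == -1 else rest * 10 + min(num_1 % 10, num_2 % 10)
-- ===== Notes on version B (the rewrite author's own statement) =====
-- stated objective: simpler
-- what changed: Replaces A's iterative loop with accumulator and running power-of-ten by a direct most-significant-first recursion that builds rest*10+min(digit,digit) and propagates -1, deciding validity inside the recursion instead of by leftover loop state.
import Mathlib
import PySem

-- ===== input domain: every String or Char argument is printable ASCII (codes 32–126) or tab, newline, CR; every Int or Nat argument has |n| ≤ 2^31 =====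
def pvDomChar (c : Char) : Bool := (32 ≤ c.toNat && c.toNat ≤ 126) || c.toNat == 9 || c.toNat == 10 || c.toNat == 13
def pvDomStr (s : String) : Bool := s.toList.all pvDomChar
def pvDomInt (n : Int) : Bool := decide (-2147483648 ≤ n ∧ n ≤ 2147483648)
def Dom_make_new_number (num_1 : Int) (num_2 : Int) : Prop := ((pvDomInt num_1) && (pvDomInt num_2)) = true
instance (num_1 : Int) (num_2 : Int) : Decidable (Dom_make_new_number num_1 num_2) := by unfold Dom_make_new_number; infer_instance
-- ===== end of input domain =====

-- B replaces A's accumulator/power-of-ten while loop by a most-significant-first recursion with -1 propagation (same cost; simpler).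

-- ===== PORT A =====
-- A's while loop, state (num_1, num_2, new_number, multi); the trailing if/else is the code after the loop
def makeLoopA (n1 n2 acc multi : Int) : Int :=
  if h : n1 > 0 ∧ n2 > 0 then
    makeLoopA (PySem.Int.floordiv n1 10) (PySem.Int.floordiv n2 10)
      (acc + (if PySem.Int.mod n1 10 > PySem.Int.mod n2 10 then PySem.Int.mod n2 10
              else PySem.Int.mod n1 10) * multi)
      (multi * 10)
  else if n1 = 0 ∧ n2 = 0 then acc else -1
termination_by n1.toNat
decreasing_by
  rw [PySem.Int.floordiv_eq_ediv_of_pos (by norm_num)]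
  omega

def make_new_number (num_1 : Int) (num_2 : Int) : Int := makeLoopA num_1 num_2 0 1

-- ===== PORT B =====
def make_new_number_alt (num_1 : Int) (num_2 : Int) : Int :=
  if h : num_1 ≤ 0 ∨ num_2 ≤ 0 then
    if num_1 = 0 ∧ num_2 = 0 then 0 else -1
  else
    if make_new_number_alt (PySem.Int.floordiv num_1 10) (PySem.Int.floordiv num_2 10) = -1 then -1
    else make_new_number_alt (PySem.Int.floordiv num_1 10) (PySem.Int.floordiv num_2 10) * 10
         + min (PySem.Int.mod num_1 10) (PySem.Int.mod num_2 10)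
termination_by num_1.toNat
decreasing_by
  all_goals rw [PySem.Int.floordiv_eq_ediv_of_pos (by norm_num)]
  all_goals omega

-- ===== PRECONDITION & SPEC =====
def Spec_make_new_number (num_1 : Int) (num_2 : Int) (out : Int) : Prop := out = make_new_number_alt num_1 num_2
instance (num_1 : Int) (num_2 : Int) (out : Int) : Decidable (Spec_make_new_number num_1 num_2 out) := by unfold Spec_make_new_number; infer_instance

-- ===== CLAIM (what is proved, stated in full; the proofs are below) =====
def Claim_equal_make_new_number : Prop := ∀ (num_1 : Int) (num_2 : Int), Dom_make_new_number num_1 num_2 → Spec_make_new_number num_1 num_2 (make_new_number num_1 num_2)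

-- ===== LEMMAS AND PROOFS =====

-- B's result is either -1 or nonnegative (strong induction on num_1.toNat)
lemma alt_aux (k : Nat) : ∀ n1 n2 : Int, n1.toNat ≤ k →
    make_new_number_alt n1 n2 = -1 ∨ 0 ≤ make_new_number_alt n1 n2 := by
  induction k with
  | zero =>
      intro n1 n2 hk
      rw [make_new_number_alt]
      split_ifs with h h0 h1
      · right; norm_num
      · left; rfl
      · exfalso; omega
      · exfalso; omega
  | succ k ih =>
      intro n1 n2 hk
      rw [make_new_number_alt]
      split_ifs with h h0 h1
      · right; norm_num
      · left; rfl
      · left; rfl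
      · right
        have hb : (PySem.Int.floordiv n1 10).toNat ≤ k := by
          rw [PySem.Int.floordiv_eq_ediv_of_pos (by norm_num)]; omega
        rcases ih (PySem.Int.floordiv n1 10) (PySem.Int.floordiv n2 10) hb with hr | hr
        · exact absurd hr h1
        · have m1 := PySem.Int.mod_nonneg n1 (b := 10) (by norm_num)
          have m2 := PySem.Int.mod_nonneg n2 (b := 10) (by norm_num)
          have hm := le_min m1 m2
          omega

lemma alt_neg_one_or_nonneg (n1 n2 : Int) :
    make_new_number_alt n1 n2 = -1 ∨ 0 ≤ make_new_number_alt n1 n2 :=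
  alt_aux n1.toNat n1 n2 le_rfl

-- loop invariant: A's loop equals acc + B·multi, with -1 absorbing
lemma loop_aux (k : Nat) : ∀ n1 n2 acc multi : Int, n1.toNat ≤ k → 0 < multi →
    makeLoopA n1 n2 acc multi =
      if make_new_number_alt n1 n2 = -1 then -1
      else acc + make_new_number_alt n1 n2 * multi := by
  induction k with
  | zero =>
      intro n1 n2 acc multi hk hm
      rw [makeLoopA, dif_neg (by omega), make_new_number_alt, dif_pos (by omega)]
      by_cases h0 : n1 = 0 ∧ n2 = 0 <;> simp [h0]
  | succ k ih =>
      intro n1 n2 acc multi hk hm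
      by_cases hc : n1 > 0 ∧ n2 > 0
      · rw [makeLoopA, dif_pos hc, make_new_number_alt, dif_neg (by omega)]
        have hb : (PySem.Int.floordiv n1 10).toNat ≤ k := by
          rw [PySem.Int.floordiv_eq_ediv_of_pos (by norm_num)]; omega
        rw [ih _ _ _ _ hb (by positivity)]
        rcases alt_neg_one_or_nonneg (PySem.Int.floordiv n1 10) (PySem.Int.floordiv n2 10)
          with hr | hr
        · rw [if_pos hr, if_pos hr, if_pos rfl]
        · have m1 := PySem.Int.mod_nonneg n1 (b := 10) (by norm_num)
          have m2 := PySem.Int.mod_nonneg n2 (b := 10) (by norm_num)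
          have hm12 := le_min m1 m2
          have h1 : ¬(make_new_number_alt (PySem.Int.floordiv n1 10)
              (PySem.Int.floordiv n2 10) = -1) := by omega
          rw [if_neg h1, if_neg h1]
          have h2 : ¬(make_new_number_alt (PySem.Int.floordiv n1 10) (PySem.Int.floordiv n2 10)
              * 10 + min (PySem.Int.mod n1 10) (PySem.Int.mod n2 10) = -1) := by omega
          rw [if_neg h2]
          have hmin : (if PySem.Int.mod n1 10 > PySem.Int.mod n2 10 then PySem.Int.mod n2 10
              else PySem.Int.mod n1 10) = min (PySem.Int.mod n1 10) (PySem.Int.mod n2 10) := by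
            rw [min_def]; split_ifs <;> omega
          rw [hmin]; ring
      · rw [makeLoopA, dif_neg hc, make_new_number_alt, dif_pos (by omega)]
        by_cases h0 : n1 = 0 ∧ n2 = 0 <;> simp [h0]

-- ===== VERDICT (by name: the statement is the Claim_ definition above) =====
theorem make_new_number_spec : Claim_equal_make_new_number := by
  intro n1 n2 _
  unfold Spec_make_new_number make_new_number
  rw [loop_aux n1.toNat n1 n2 0 1 le_rfl one_pos]
  rcases alt_neg_one_or_nonneg n1 n2 with h | h
  · simp [h]
  · rw [if_neg (by omega)]; ring
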